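-- pv_equiv track=rewrite | github.com/max-prime-math/ocr-frq | src/mathpix.py | _strip_command_with_braces
-- ===== SOURCE A (Python) =====
-- def _strip_command_with_braces(text: str, cmd: str) -> str:
--     """
--     Remove all occurrences of \\cmd{...} using brace-depth counting.
--
--     Handles nested braces and multi-line titles correctly.
--     """
--     needle = f"\\{cmd}" + "{"
--     result: list[str] = []
--     i = 0
--     while i < len(text):
--         if text[i:i + len(needle)] == needle:
--             brace_start = i + len(needle) - 1  # position of opening {
--             depth = 0
--             j = brace_start
--             while j < len(text):
--                 if text[j] == "{":
--                     depth += 1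
--                 elif text[j] == "}":
--                     depth -= 1
--                     if depth == 0:
--                         j += 1
--                         break
--                 j += 1
--             # Skip trailing whitespace / newline
--             while j < len(text) and text[j] in " \t\n":
--                 j += 1
--             i = j
--         else:
--             result.append(text[i])
--             i += 1
--     return "".join(result)
-- ===== SOURCE B (Python) =====
-- def _strip_command_with_braces(text: str, cmd: str) -> str:
--     """Two-phase: collect deletion spans (start, end) by jumping with str.find,
--     then assemble the kept slices."""
--     needle = "\\" + cmd + "{"
--     n = len(text)
--     spans = []
--     pos = 0
--     while True:
--         k = text.find(needle, pos)
--         if k == -1: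
--             break
--         depth = 0
--         j = k + len(needle) - 1
--         while j < n:
--             ch = text[j]
--             if ch == "{":
--                 depth += 1
--             elif ch == "}":
--                 depth -= 1
--                 if depth == 0:
--                     j += 1
--                     break
--             j += 1
--         while j < n and text[j] in " \t\n":
--             j += 1
--         spans.append((k, j))
--         pos = j
--     pieces = []
--     last = 0
--     for a, b in spans:
--         pieces.append(text[last:a])
--         last = b
--     pieces.append(text[last:])
--     return "".join(pieces)
-- ===== Notes on version B (the rewrite author's own statement) =====
-- stated objective: faster
-- what changed: Replaced A's per-character scan-and-append (a needle-length slice comparison and one-char append at every position) by a two-phase algorithm: phase 1 collects the deletion spans by jumping with str.find, phase 2 assembles the kept slices.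
import Mathlib
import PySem

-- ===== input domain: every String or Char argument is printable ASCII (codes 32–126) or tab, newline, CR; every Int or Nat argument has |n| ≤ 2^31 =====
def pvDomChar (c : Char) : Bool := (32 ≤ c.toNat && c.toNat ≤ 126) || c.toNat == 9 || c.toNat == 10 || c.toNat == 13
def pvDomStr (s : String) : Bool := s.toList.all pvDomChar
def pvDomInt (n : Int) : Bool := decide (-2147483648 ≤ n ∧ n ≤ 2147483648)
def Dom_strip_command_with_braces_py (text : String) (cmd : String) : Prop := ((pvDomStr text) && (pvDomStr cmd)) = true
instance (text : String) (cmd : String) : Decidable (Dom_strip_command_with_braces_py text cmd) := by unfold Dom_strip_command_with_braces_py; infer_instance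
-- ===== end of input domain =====

-- B replaces A's per-character scan-and-append by a two-phase algorithm: first collect
-- the deletion spans (start, end) by jumping with str.find, then assemble the kept slices.

-- ===== PORT A =====
-- needle = "\\" + cmd + "{"
def pvNeedle (cmd : String) : List Char := '\\' :: (cmd.toList ++ ['{'])

-- A's inner brace-depth loop, on the suffix of the text starting at brace_start;
-- returns the rest of the text after the closing brace (or [] if it runs off the end)
def pvScanBrace : List Char → Int → List Char
  | [], _ => []
  | c :: t, d =>
    if c = '{' then pvScanBrace t (d + 1)
    else if c = '}' then (if d - 1 = 0 then t else pvScanBrace t (d - 1))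
    else pvScanBrace t d

-- A's trailing-whitespace skip loop
def pvSkipWs (l : List Char) : List Char :=
  l.dropWhile (fun c => c = ' ' || c = '\t' || c = '\n')

-- from a suffix starting at a needle occurrence: drop to brace_start, run the brace
-- loop, skip whitespace
def pvNext (cmd : String) (occ : List Char) : List Char :=
  pvSkipWs (pvScanBrace (occ.drop (cmd.toList.length + 1)) 0)

theorem pvScanBrace_length_le (l : List Char) (d : Int) :
    (pvScanBrace l d).length ≤ l.length := by
  induction l generalizing d with
  | nil => simp [pvScanBrace]
  | cons c t ih =>
    simp only [pvScanBrace]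
    split_ifs with h1 h2 h3
    · exact Nat.le_succ_of_le (ih _)
    · simp
    · exact Nat.le_succ_of_le (ih _)
    · exact Nat.le_succ_of_le (ih _)

theorem pvNext_length_lt (cmd : String) (c : Char) (t : List Char) :
    (pvNext cmd (c :: t)).length < (c :: t).length := by
  unfold pvNext pvSkipWs
  calc (List.dropWhile _ (pvScanBrace ((c :: t).drop (cmd.toList.length + 1)) 0)).length
      ≤ (pvScanBrace ((c :: t).drop (cmd.toList.length + 1)) 0).length :=
        List.length_dropWhile_le _ _
    _ ≤ ((c :: t).drop (cmd.toList.length + 1)).length := pvScanBrace_length_le _ _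
    _ ≤ t.length := by simp only [List.length_drop, List.length_cons]; omega
    _ < (c :: t).length := by simp

-- A's outer loop: character-by-character scan, appending one char unless the needle
-- matches at the current position
def pvGoA (cmd : String) : List Char → List Char
  | [] => []
  | c :: t =>
    if (pvNeedle cmd).isPrefixOf (c :: t) then
      pvGoA cmd (pvNext cmd (c :: t))
    else
      c :: pvGoA cmd t
termination_by l => l.length
decreasing_by
  · exact pvNext_length_lt cmd c t
  · simp

def strip_command_with_braces_py (text : String) (cmd : String) : String :=
  String.ofList (pvGoA cmd text.toList)

-- ===== PORT B =====
-- B works with Nat indices into the fixed text, as Source B does; each loop carries a fuel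
-- counter (always called with fuel > text length, a pure totality guard).
-- needle = "\\" + cmd + "{", as Source B computes it
def pvNeedleB (cmd : String) : List Char := ("\\" ++ cmd ++ "{").toList

-- text.find(needle, pos): smallest index ≥ pos where needle matches, none = -1
def pvFindIdx (needle t : List Char) : Nat → Nat → Option Nat
  | 0, _ => none
  | fuel + 1, pos =>
    if pos < t.length then
      if needle.isPrefixOf (t.drop pos) then some pos
      else pvFindIdx needle t fuel (pos + 1)
    else none

-- inner brace loop of Source B: index just past the matching close brace
def pvBraceEnd (t : List Char) : Nat → Nat → Int → Nat
  | 0, j, _ => j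
  | fuel + 1, j, d =>
    if h : j < t.length then
      if t[j] = '{' then pvBraceEnd t fuel (j + 1) (d + 1)
      else if t[j] = '}' then (if d - 1 = 0 then j + 1 else pvBraceEnd t fuel (j + 1) (d - 1))
      else pvBraceEnd t fuel (j + 1) d
    else j

-- whitespace skip of Source B: first index ≥ j whose char is not in " \t\n"
def pvWsEnd (t : List Char) : Nat → Nat → Nat
  | 0, j => j
  | fuel + 1, j =>
    if h : j < t.length then
      if t[j] = ' ' ∨ t[j] = '\t' ∨ t[j] = '\n' then pvWsEnd t fuel (j + 1) else j
    else j

-- phase 1 of Source B: collect the deletion spans (k, j)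
def pvSpans (cmd : String) (t : List Char) : Nat → Nat → List (Nat × Nat)
  | 0, _ => []
  | fuel + 1, pos =>
    match pvFindIdx (pvNeedleB cmd) t (t.length + 1) pos with
    | none => []
    | some k =>
      let j := pvWsEnd t (t.length + 1)
        (pvBraceEnd t (t.length + 1) (k + (pvNeedleB cmd).length - 1) 0)
      (k, j) :: pvSpans cmd t fuel j

-- phase 2 of Source B: pieces.append(text[last:a]) for each span, then the tail
def pvAssemble (t : List Char) : List (Nat × Nat) → Nat → List Char
  | [], last => t.drop last
  | (a, b) :: rest, last => (t.drop last).take (a - last) ++ pvAssemble t rest b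

def strip_command_with_braces_py_alt (text : String) (cmd : String) : String :=
  String.ofList
    (pvAssemble text.toList
      (pvSpans cmd text.toList (text.toList.length + 1) 0) 0)

-- ===== PRECONDITION & SPEC =====
def Spec_strip_command_with_braces_py (text : String) (cmd : String) (out : String) : Prop := out = strip_command_with_braces_py_alt text cmd
instance (text : String) (cmd : String) (out : String) : Decidable (Spec_strip_command_with_braces_py text cmd out) := by unfold Spec_strip_command_with_braces_py; infer_instance

-- ===== CLAIM (what is proved, stated in full; the proofs are below) =====
def Claim_equal_strip_command_with_braces_py : Prop := ∀ (text : String) (cmd : String), Dom_strip_command_with_braces_py text cmd → Spec_strip_command_with_braces_py text cmd (strip_command_with_braces_py text cmd)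

-- ===== LEMMAS AND PROOFS =====

-- the two needle computations agree
theorem needle_toList (cmd : String) : pvNeedleB cmd = pvNeedle cmd := by
  simp [pvNeedleB, pvNeedle]

theorem pvNeedleB_length (cmd : String) :
    (pvNeedleB cmd).length = cmd.toList.length + 2 := by
  simp [pvNeedleB]

-- a found index lies between pos and the end of the text
theorem pvFindIdx_some_le {needle t : List Char} {fuel pos k : Nat}
    (h : pvFindIdx needle t fuel pos = some k) : pos ≤ k ∧ k < t.length := by
  induction fuel generalizing pos with
  | zero => simp [pvFindIdx] at h
  | succ fuel ih =>
    simp only [pvFindIdx] at h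
    split_ifs at h with h1 h2
    · simp only [Option.some.injEq] at h; omega
    · have := ih h; omega

-- the brace loop never moves backwards
theorem pvBraceEnd_ge (t : List Char) (fuel j : Nat) (d : Int) :
    j ≤ pvBraceEnd t fuel j d := by
  induction fuel generalizing j d with
  | zero => simp [pvBraceEnd]
  | succ fuel ih =>
    simp only [pvBraceEnd]
    split_ifs with h1 h2 h3 h4
    · exact le_trans (by omega) (ih (j + 1) (d + 1))
    · omega
    · exact le_trans (by omega) (ih (j + 1) (d - 1))
    · exact le_trans (by omega) (ih (j + 1) d)
    · omega

-- the whitespace skip never moves backwards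
theorem pvWsEnd_ge (t : List Char) (fuel j : Nat) : j ≤ pvWsEnd t fuel j := by
  induction fuel generalizing j with
  | zero => simp [pvWsEnd]
  | succ fuel ih =>
    simp only [pvWsEnd]
    split_ifs with h1 h2
    · exact le_trans (by omega) (ih (j + 1))
    · omega
    · omega

-- with sufficient fuel, A's scan on a suffix with no needle occurrence returns it unchanged
theorem pvGoA_no_occ (cmd : String) (t : List Char) (fuel pos : Nat)
    (hf : t.length < fuel + pos)
    (h : pvFindIdx (pvNeedle cmd) t fuel pos = none) : pvGoA cmd (t.drop pos) = t.drop pos := by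
  induction fuel generalizing pos with
  | zero =>
    rw [List.drop_eq_nil_of_le (by omega)]
    simp [pvGoA]
  | succ fuel ih =>
    simp only [pvFindIdx] at h
    split_ifs at h with h1 h2
    · rw [List.drop_eq_getElem_cons h1]
      rw [pvGoA, if_neg (by rw [← List.drop_eq_getElem_cons h1]; exact h2)]
      rw [ih (pos + 1) (by omega) h]
    · rw [List.drop_eq_nil_of_le (by omega)]
      simp [pvGoA]

-- with sufficient fuel, A's scan emits the chunk up to the first occurrence found by find
theorem pvGoA_occ (cmd : String) (t : List Char) (fuel pos k : Nat)
    (h : pvFindIdx (pvNeedle cmd) t fuel pos = some k) :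
    pvGoA cmd (t.drop pos) = (t.drop pos).take (k - pos) ++ pvGoA cmd (pvNext cmd (t.drop k)) := by
  induction fuel generalizing pos with
  | zero => simp [pvFindIdx] at h
  | succ fuel ih =>
    simp only [pvFindIdx] at h
    split_ifs at h with h1 h2
    · have hk : k = pos := by simp_all
      subst hk
      rw [List.drop_eq_getElem_cons h1]
      rw [pvGoA, if_pos (by rw [← List.drop_eq_getElem_cons h1]; exact h2)]
      simp [← List.drop_eq_getElem_cons h1]
    · have hk : pos + 1 ≤ k := (pvFindIdx_some_le h).1
      rw [List.drop_eq_getElem_cons h1]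
      rw [pvGoA, if_neg (by rw [← List.drop_eq_getElem_cons h1]; exact h2)]
      rw [ih (pos + 1) h]
      have : k - pos = (k - (pos + 1)) + 1 := by omega
      rw [this, List.take_succ_cons]
      simp

-- with sufficient fuel, the index-based brace loop computes the same suffix as A's
theorem braceEnd_drop (t : List Char) (fuel j : Nat) (d : Int) (hf : t.length < fuel + j) :
    t.drop (pvBraceEnd t fuel j d) = pvScanBrace (t.drop j) d := by
  induction fuel generalizing j d with
  | zero =>
    have h0 : t.drop j = [] := List.drop_eq_nil_of_le (by omega)
    simp [pvBraceEnd, h0, pvScanBrace]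
  | succ fuel ih =>
    simp only [pvBraceEnd]
    split_ifs with h1 h2 h3 h4
    · rw [List.drop_eq_getElem_cons h1, pvScanBrace, if_pos h2]
      exact ih (j + 1) (d + 1) (by omega)
    · rw [List.drop_eq_getElem_cons h1, pvScanBrace, if_neg h2, if_pos h3, if_pos h4]
    · rw [List.drop_eq_getElem_cons h1, pvScanBrace, if_neg h2, if_pos h3, if_neg h4]
      exact ih (j + 1) (d - 1) (by omega)
    · rw [List.drop_eq_getElem_cons h1, pvScanBrace, if_neg h2, if_neg h3]
      exact ih (j + 1) d (by omega)
    · rw [List.drop_eq_nil_of_le (by omega)]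
      simp [pvScanBrace]

-- with sufficient fuel, the index-based whitespace skip matches A's dropWhile
theorem wsEnd_drop (t : List Char) (fuel j : Nat) (hf : t.length < fuel + j) :
    t.drop (pvWsEnd t fuel j) = pvSkipWs (t.drop j) := by
  induction fuel generalizing j with
  | zero =>
    have h0 : t.drop j = [] := List.drop_eq_nil_of_le (by omega)
    simp [pvWsEnd, h0, pvSkipWs]
  | succ fuel ih =>
    simp only [pvWsEnd]
    split_ifs with h1 h2
    · rw [List.drop_eq_getElem_cons h1]
      unfold pvSkipWs
      rw [List.dropWhile_cons_of_pos (by simp only [decide_eq_true_eq, Bool.or_eq_true]; tauto)]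
      exact ih (j + 1) (by omega)
    · rw [List.drop_eq_getElem_cons h1]
      unfold pvSkipWs
      rw [List.dropWhile_cons_of_neg (by simp_all)]
    · rw [List.drop_eq_nil_of_le (by omega)]
      simp [pvSkipWs]

-- B's next position, read back as A's list-based continuation
theorem next_drop (cmd : String) (t : List Char) (k : Nat) :
    t.drop (pvWsEnd t (t.length + 1)
        (pvBraceEnd t (t.length + 1) (k + (pvNeedleB cmd).length - 1) 0)) =
      pvNext cmd (t.drop k) := by
  rw [wsEnd_drop t _ _ (by omega), braceEnd_drop t _ _ _ (by omega)]
  unfold pvNext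
  rw [List.drop_drop]
  congr 1
  simp [pvNeedleB_length]

-- main invariant: A's scan of the suffix at pos equals B's assembly of the spans from pos
theorem goA_eq_assemble (cmd : String) (t : List Char) (fuel pos : Nat)
    (hf : t.length < fuel + pos) :
    pvGoA cmd (t.drop pos) = pvAssemble t (pvSpans cmd t fuel pos) pos := by
  induction fuel generalizing pos with
  | zero =>
    rw [List.drop_eq_nil_of_le (by omega)]
    simp [pvSpans, pvAssemble, pvGoA, List.drop_eq_nil_of_le (show t.length ≤ pos by omega)]
  | succ fuel ih =>
    rw [pvSpans]
    cases h : pvFindIdx (pvNeedleB cmd) t (t.length + 1) pos with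
    | none =>
      rw [needle_toList] at h
      rw [pvGoA_no_occ cmd t (t.length + 1) pos (by omega) h]
      simp [pvAssemble]
    | some k =>
      have hk := pvFindIdx_some_le h
      rw [needle_toList] at h
      rw [pvGoA_occ cmd t (t.length + 1) pos k h]
      simp only [pvAssemble]
      have hbr := pvBraceEnd_ge t (t.length + 1) (k + (pvNeedleB cmd).length - 1) 0
      have hws := pvWsEnd_ge t (t.length + 1)
        (pvBraceEnd t (t.length + 1) (k + (pvNeedleB cmd).length - 1) 0)
      have hlen := pvNeedleB_length cmd
      rw [← ih _ (by omega), ← next_drop cmd t k]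

-- ===== VERDICT (by name: the statement is the Claim_ definition above) =====
theorem strip_command_with_braces_py_spec : Claim_equal_strip_command_with_braces_py := by
  intro text cmd _
  unfold Spec_strip_command_with_braces_py strip_command_with_braces_py strip_command_with_braces_py_alt
  exact congrArg String.ofList
    (by simpa using goA_eq_assemble cmd text.toList (text.toList.length + 1) 0 (by omega))
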